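-- pv_equiv track=rewrite | github.com/Rubenbmxxx/rfb-dynamic-csv-to-json | src/csv_to_json_dynamic.py | extract_group_columns
-- ===== SOURCE A (Python) =====
-- def extract_group_columns(json_schema, nested_levels):
--     slc_columns = []
--     grp_columns = []
--
--     for level in nested_levels:
--         if level in json_schema:
--             sub_level = json_schema[level]
--             slc, grp = extract_group_columns(json_schema, sub_level)
--             grp_columns.extend(grp)
--             slc_columns.extend(slc)
--         else:
--             if level.split("_")[0].endswith("List"):
--                 grp_columns.append(level)
--             slc_columns.append(level)
--     return slc_columns, grp_columns
-- ===== SOURCE B (Python) =====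
-- def extract_group_columns(json_schema, nested_levels):
--     # Iterative DFS with an explicit stack instead of A's recursion: pop a
--     # level; if it is a schema key push its sub-levels (reversed, so the
--     # pre-order is preserved), otherwise record it in one/both output lists.
--     slc_columns = []
--     grp_columns = []
--     stack = list(reversed(nested_levels))
--     while stack:
--         level = stack.pop()
--         if level in json_schema:
--             stack.extend(reversed(json_schema[level]))
--         else:
--             slc_columns.append(level)
--             if level.split("_")[0].endswith("List"):
--                 grp_columns.append(level)
--     return slc_columns, grp_columns
-- ===== Notes on version B (the rewrite author's own statement) =====
-- stated objective: alternative
-- what changed: B replaces A's recursion (which threads two accumulator lists through every recursive call) by an iterative pre-order DFS over an explicit work stack: one while-loop pops a level, pushes a key's sub-levels reversed, and appends leaves to both output lists in a single pass.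
import Mathlib
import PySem

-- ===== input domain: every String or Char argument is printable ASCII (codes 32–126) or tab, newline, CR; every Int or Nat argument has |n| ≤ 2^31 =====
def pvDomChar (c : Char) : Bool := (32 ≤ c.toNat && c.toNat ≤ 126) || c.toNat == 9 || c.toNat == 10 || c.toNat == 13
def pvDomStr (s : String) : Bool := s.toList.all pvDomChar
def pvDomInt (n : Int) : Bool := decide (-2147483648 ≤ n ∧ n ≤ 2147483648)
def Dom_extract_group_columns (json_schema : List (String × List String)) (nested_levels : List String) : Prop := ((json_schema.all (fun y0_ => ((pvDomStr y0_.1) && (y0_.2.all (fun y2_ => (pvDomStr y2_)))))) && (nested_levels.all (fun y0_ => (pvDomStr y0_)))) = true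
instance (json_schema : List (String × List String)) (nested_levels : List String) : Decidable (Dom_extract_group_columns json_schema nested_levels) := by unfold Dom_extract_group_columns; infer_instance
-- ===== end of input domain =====

-- B replaces A's recursion by an iterative pre-order DFS over an explicit work stack,
-- appending to both output lists in a single loop (alternative decomposition, same cost).

-- shared Python-semantics helpers: dict lookup (first match) and the
-- level.split("_")[0].endswith("List") test, exact on the ASCII domain via PySem
def pvLookup (s : List (String × List String)) (k : String) : Option (List String) :=
  (s.find? (fun kv => kv.1 == k)).map Prod.snd

def pvIsGrp (level : String) : Bool :=
  PySem.Str.endswith (((PySem.Str.split? level "_").getD [""]).getD 0 "") "List"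

-- ===== PORT A =====
-- A's recursion is not structurally terminating (the schema may be cyclic, where Python
-- recurses forever); the port takes fuel json_schema.length + 1, which Pre_ below
-- guarantees is never exhausted, so the fuel-0 branch is unreachable on admitted inputs.
def egcA (s : List (String × List String)) : Nat → List String → List String × List String
  | _, [] => ([], [])
  | 0, _ :: _ => ([], [])
  | f + 1, level :: rest =>
    match pvLookup s level with
    | some sub =>
        let sg := egcA s f sub
        let rg := egcA s (f + 1) rest
        (sg.1 ++ rg.1, sg.2 ++ rg.2)
    | none =>
        let rg := egcA s (f + 1) rest
        (level :: rg.1, if pvIsGrp level then level :: rg.2 else rg.2)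
  termination_by f levels => (f, levels.length)

def extract_group_columns (json_schema : List (String × List String)) (nested_levels : List String) : List String × List String :=
  egcA json_schema (json_schema.length + 1) nested_levels

-- ===== PORT B =====
-- largest sub-level list in the schema (only used for the loop's termination measure)
def pvMaxSub (s : List (String × List String)) : Nat :=
  s.foldr (fun kv m => max kv.2.length m) 0

-- termination helpers for the stack loop (cited by decreasing_by below)
theorem pvLookup_len_le (s : List (String × List String)) (k : String) (sub : List String)
    (h : pvLookup s k = some sub) : sub.length ≤ pvMaxSub s := by
  induction s with
  | nil => simp [pvLookup] at h
  | cons kv rest ih =>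
    simp only [pvLookup, List.find?] at h
    by_cases hk : (kv.1 == k) = true
    · simp [hk] at h
      simp [pvMaxSub, ← h]
    · simp [hk] at h
      have := ih (by simpa [pvLookup] using h)
      simp only [pvMaxSub, List.foldr] at *
      omega

theorem pvWeight_sum (base fw : Nat) (xs : List String) :
    ((xs.map (fun x => (fw, x))).map (fun p : Nat × String => base ^ p.1)).sum
      = xs.length * base ^ fw := by
  induction xs with
  | nil => simp
  | cons x xs ih =>
    simp only [List.map_cons, List.sum_cons, List.map_map] at ih ⊢
    rw [ih, List.length_cons]; ring

-- B's while-loop over the stack; the stack top is the list head (Python pops from the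
-- end of a reversed list, which visits levels in the same order). The two output lists
-- are built back-to-front in accumulators and reversed at the end (= Python's append).
-- Each stack entry carries a fuel (totality device only, as in port A): a key is only
-- expanded with positive fuel, and Pre_ guarantees fuel is never exhausted.
def egcB (s : List (String × List String)) :
    List (Nat × String) → List String → List String → List String × List String
  | [], slc, grp => (slc.reverse, grp.reverse)
  | (0, _) :: stack, slc, grp => egcB s stack slc grp
  | (f + 1, level) :: stack, slc, grp =>
    match h : pvLookup s level with
    | some sub => egcB s (sub.map (fun x => (f, x)) ++ stack) slc grp
    | none => egcB s stack (level :: slc) (if pvIsGrp level then level :: grp else grp)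
  termination_by stack _ _ => ((stack.map (fun p : Nat × String => (pvMaxSub s + 1) ^ p.1)).sum)
  decreasing_by
  · simp
  · simp only [List.map_append, List.sum_append, pvWeight_sum, List.map_cons, List.sum_cons,
      Nat.succ_eq_add_one]
    have hle := pvLookup_len_le s level sub h
    have hpos : 0 < (pvMaxSub s + 1) ^ f := Nat.pow_pos (by omega)
    have hstep : sub.length * (pvMaxSub s + 1) ^ f < (pvMaxSub s + 1) ^ (f + 1) := by
      calc sub.length * (pvMaxSub s + 1) ^ f
          ≤ pvMaxSub s * (pvMaxSub s + 1) ^ f := Nat.mul_le_mul_right _ hle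
        _ < (pvMaxSub s + 1) * (pvMaxSub s + 1) ^ f := by
            exact Nat.mul_lt_mul_of_lt_of_le (by omega) (le_refl _) hpos
        _ = (pvMaxSub s + 1) ^ (f + 1) := by ring
    omega
  · have hpos : 0 < (pvMaxSub s + 1) ^ (f + 1) := Nat.pow_pos (by omega)
    simp only [List.map_cons, List.sum_cons, Nat.succ_eq_add_one]
    omega

def extract_group_columns_alt (json_schema : List (String × List String)) (nested_levels : List String) : List String × List String :=
  egcB json_schema (nested_levels.map (fun l => (json_schema.length + 1, l))) [] []

-- ===== PRECONDITION & SPEC =====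
-- successor strings of a level: its sub-level list if it is a schema key, else none
def pvSuccs (s : List (String × List String)) (k : String) : List String :=
  (pvLookup s k).getD []

-- all strings reachable from xs along schema-key expansion, to the given depth
def pvReach (s : List (String × List String)) : Nat → List String → List String
  | 0, _ => []
  | n + 1, xs => xs ++ pvReach s n (xs.flatMap (pvSuccs s))

-- pvReach n xs is the depth-n-bounded transitive closure of the INPUT's key graph (an
-- edge goes from a key to each string in its sub-level list); with depth length+1 it is the
-- full reachability relation. It is a property of the schema alone and computes neither
-- port's output. Pre_ says: no key reachable from nested_levels lies on a key cycle — i.e.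
-- the part of the schema graph the call touches is acyclic. This is exactly where Python A
-- returns; on excluded inputs A recurses forever (RecursionError), and B loops forever.
def Pre_extract_group_columns (json_schema : List (String × List String)) (nested_levels : List String) : Prop :=
  ∀ k ∈ pvReach json_schema (json_schema.length + 1) nested_levels,
    k ∉ pvReach json_schema (json_schema.length + 1) (pvSuccs json_schema k)

instance (json_schema : List (String × List String)) (nested_levels : List String) : Decidable (Pre_extract_group_columns json_schema nested_levels) := by
  unfold Pre_extract_group_columns; infer_instance

def pvWitness_extract_group_columns : (List (String × List String)) × List String :=
  ([("aList", ["x", "yList_2"]), ("x", ["p", "qList"])], ["aList", "b"])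

def Spec_extract_group_columns (json_schema : List (String × List String)) (nested_levels : List String) (out : List String × List String) : Prop := out = extract_group_columns_alt json_schema nested_levels
instance (json_schema : List (String × List String)) (nested_levels : List String) (out : List String × List String) : Decidable (Spec_extract_group_columns json_schema nested_levels out) := by unfold Spec_extract_group_columns; infer_instance

-- ===== CLAIM (what is proved, stated in full; the proofs are below) =====
def Claim_equal_extract_group_columns : Prop := ∀ (json_schema : List (String × List String)) (nested_levels : List String), Dom_extract_group_columns json_schema nested_levels → Pre_extract_group_columns json_schema nested_levels → Spec_extract_group_columns json_schema nested_levels (extract_group_columns json_schema nested_levels)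

-- ===== LEMMAS AND PROOFS =====
-- A's answer on a stack of fueled levels: the concatenation of its per-level answers
def stkSpec (s : List (String × List String)) : List (Nat × String) → List String × List String
  | [] => ([], [])
  | (f, l) :: rest =>
    ((egcA s f [l]).1 ++ (stkSpec s rest).1, (egcA s f [l]).2 ++ (stkSpec s rest).2)

theorem egcA_append (s : List (String × List String)) (f : Nat) :
    ∀ (xs ys : List String),
      egcA s f (xs ++ ys)
        = ((egcA s f xs).1 ++ (egcA s f ys).1, (egcA s f xs).2 ++ (egcA s f ys).2) := by
  intro xs
  induction xs generalizing f with
  | nil => intro ys; simp [egcA]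
  | cons x xs ih =>
    intro ys
    cases f with
    | zero =>
      cases ys <;> simp [egcA]
    | succ f =>
      simp only [List.cons_append, egcA]
      cases h : pvLookup s x <;> simp [ih, List.append_assoc] <;> split <;> simp

theorem stkSpec_append (s : List (String × List String)) :
    ∀ (a b : List (Nat × String)),
      stkSpec s (a ++ b)
        = ((stkSpec s a).1 ++ (stkSpec s b).1, (stkSpec s a).2 ++ (stkSpec s b).2) := by
  intro a b
  induction a with
  | nil => simp [stkSpec]
  | cons p rest ih => cases p; simp [stkSpec, ih]

theorem stkSpec_map (s : List (String × List String)) (f : Nat) (xs : List String) :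
    stkSpec s (xs.map (fun x => (f, x))) = egcA s f xs := by
  induction xs with
  | nil =>
    cases f <;> simp [stkSpec, egcA]
  | cons x xs ih =>
    have h := egcA_append s f [x] xs
    simp only [List.singleton_append] at h
    simp [stkSpec, ih, h]

-- core invariant of B's loop: result = accumulators (reversed) followed by A's answer
theorem egcB_spec (s : List (String × List String)) :
    ∀ (stack : List (Nat × String)) (slc grp : List String),
      egcB s stack slc grp
        = (slc.reverse ++ (stkSpec s stack).1, grp.reverse ++ (stkSpec s stack).2) := by
  intro stack slc grp
  induction stack, slc, grp using egcB.induct s with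
  | case1 slc grp => simp [egcB, stkSpec]
  | case2 x stack slc grp ih =>
    simp [egcB, stkSpec, ih, egcA]
  | case3 f level stack slc grp sub h ih =>
    have hA : egcA s (f + 1) [level]
        = ((egcA s f sub).1, (egcA s f sub).2) := by
      rw [egcA]; simp [h, egcA]
    rw [egcB]
    split
    · rename_i sub' heq
      rw [h] at heq; cases heq
      simp only [ih, stkSpec_append, stkSpec_map, stkSpec, hA]
    · rename_i heq
      rw [h] at heq; cases heq
  | case4 f level stack slc grp h ih =>
    have hA : egcA s (f + 1) [level]
        = ([level], if pvIsGrp level then [level] else []) := by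
      rw [egcA]; simp [h, egcA]
    rw [egcB]
    split
    · rename_i sub' heq
      rw [h] at heq; cases heq
    · simp only [stkSpec, hA]
      cases hg : pvIsGrp level <;> simp [hg] at ih <;> simp [ih]

-- ===== VERDICT (by name: the statement is the Claim_ definition above) =====
theorem extract_group_columns_spec : Claim_equal_extract_group_columns := by
  intro json_schema nested_levels _ _
  unfold Spec_extract_group_columns extract_group_columns extract_group_columns_alt
  rw [egcB_spec, stkSpec_map]
  simp
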